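-- pv_equiv track=rewrite | github.com/98coco/cs30_fall2022 | comp sci lectures/week 5 - lecture (map, filter, lamba, functools.reduce) .py | doubleAll
-- ===== SOURCE A (Python) =====
-- def doubleAll(l):
--     if l == []:
--         return []
--     else:
--         head = l[0]
--         tail = l[1:]
--         recursiveResult = doubleAll(tail)
--         return [head * 2] + recursiveResult
-- ===== SOURCE B (Python) =====
-- def doubleAll(l):
--     result = []
--     for x in l:
--         result.append(x * 2)
--     return result
-- ===== Notes on version B (the rewrite author's own statement) =====
-- stated objective: faster
-- what changed: Replaced A's head/tail structural recursion (which copies the tail with l[1:] and rebuilds via list concatenation at every level) with a single iterative for-loop appending x*2 to an accumulator.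
import Mathlib
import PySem

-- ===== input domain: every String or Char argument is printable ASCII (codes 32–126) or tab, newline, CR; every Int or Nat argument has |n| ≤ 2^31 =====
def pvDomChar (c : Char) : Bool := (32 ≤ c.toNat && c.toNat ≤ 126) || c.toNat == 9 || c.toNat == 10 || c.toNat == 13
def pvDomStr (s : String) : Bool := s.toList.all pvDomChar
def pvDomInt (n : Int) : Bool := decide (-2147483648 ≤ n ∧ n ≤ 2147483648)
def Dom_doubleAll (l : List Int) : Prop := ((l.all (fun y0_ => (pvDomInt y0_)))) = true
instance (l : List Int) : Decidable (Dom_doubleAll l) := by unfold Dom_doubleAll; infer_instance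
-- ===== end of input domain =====

-- B replaces A's head/tail recursion with an iterative accumulator loop (simpler decomposition).


-- ===== PORT A =====
-- literal transliteration of A: empty check, head = l[0], tail = l[1:], recurse, prepend head*2
def doubleAll (l : List Int) : List Int :=
  if l = [] then []
  else
    match l with
    | [] => []
    | head :: tailRest =>
      let tail := tailRest  -- l[1:]
      let recursiveResult := doubleAll tail
      [head * 2] ++ recursiveResult

-- ===== PORT B =====
-- iterative accumulator loop: result = []; for x in l: result.append(x*2); return result
def doubleAll_alt (l : List Int) : List Int :=
  l.foldl (fun result x => result ++ [x * 2]) []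

-- ===== PRECONDITION & SPEC =====
def Spec_doubleAll (l : List Int) (out : List Int) : Prop := out = doubleAll_alt l
instance (l : List Int) (out : List Int) : Decidable (Spec_doubleAll l out) := by unfold Spec_doubleAll; infer_instance

-- ===== CLAIM (what is proved, stated in full; the proofs are below) =====
def Claim_equal_doubleAll : Prop := ∀ (l : List Int), Dom_doubleAll l → Spec_doubleAll l (doubleAll l)

-- ===== LEMMAS AND PROOFS =====
theorem doubleAll_alt_acc (l : List Int) (acc : List Int) :
    l.foldl (fun result x => result ++ [x * 2]) acc = acc ++ doubleAll l := by
  induction l generalizing acc with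
  | nil => simp [doubleAll]
  | cons h t ih =>
    simp only [List.foldl_cons, ih, doubleAll]
    simp

-- ===== VERDICT (by name: the statement is the Claim_ definition above) =====
theorem doubleAll_spec : Claim_equal_doubleAll := by
  intro l _
  unfold Spec_doubleAll doubleAll_alt
  rw [doubleAll_alt_acc]
  simp
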